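-- pv_equiv track=rewrite | github.com/tamunave/yata | awards/functions.py | createAwardsSummary
-- ===== SOURCE A (Python) =====
-- def createAwardsSummary(awards):
--     awardsSummary = dict()
--     nAwardedTot = 0
--     nAwardsTot = 0
--     for k, v in awards.items():
--         nAwarded = 0
--         for l, w in v.items():
--             if w["achieve"] == 1:
--                 nAwarded += 1
--         nAwards = len(v)
--         awardsSummary[k] = {"nAwarded": nAwarded, "nAwards": nAwards}
--         nAwardedTot += nAwarded
--         nAwardsTot += nAwards
--     awardsSummary["All awards"] = {"nAwarded": nAwardedTot, "nAwards": nAwardsTot}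
--
--     return awardsSummary
-- ===== SOURCE B (Python) =====
-- def createAwardsSummary(awards):
--     # Assemble the result as a plain list of (key, entry) pairs and convert to a
--     # dict once at the end; the grand totals are computed from a flattened view
--     # of all sub-items, not by accumulating per-category results.
--     items = list(awards.items())
--     entries = [(k, {"nAwarded": len([w for w in v.values() if w["achieve"] == 1]),
--                     "nAwards": len(v)})
--                for k, v in items]
--     flat = [w for _, v in items for w in v.values()]
--     total = {"nAwarded": len([w for w in flat if w["achieve"] == 1]),
--              "nAwards": len(flat)}
--     return dict(entries + [("All awards", total)])
-- ===== Notes on version B (the rewrite author's own statement) =====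
-- stated objective: alternative
-- what changed: A mutates a dict while accumulating running totals in one pass; B assembles the result as a pure list of (key, entry) pairs, computes the grand totals independently from a flattened list of all sub-items, and converts to a dict once at the end.
import Mathlib
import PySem

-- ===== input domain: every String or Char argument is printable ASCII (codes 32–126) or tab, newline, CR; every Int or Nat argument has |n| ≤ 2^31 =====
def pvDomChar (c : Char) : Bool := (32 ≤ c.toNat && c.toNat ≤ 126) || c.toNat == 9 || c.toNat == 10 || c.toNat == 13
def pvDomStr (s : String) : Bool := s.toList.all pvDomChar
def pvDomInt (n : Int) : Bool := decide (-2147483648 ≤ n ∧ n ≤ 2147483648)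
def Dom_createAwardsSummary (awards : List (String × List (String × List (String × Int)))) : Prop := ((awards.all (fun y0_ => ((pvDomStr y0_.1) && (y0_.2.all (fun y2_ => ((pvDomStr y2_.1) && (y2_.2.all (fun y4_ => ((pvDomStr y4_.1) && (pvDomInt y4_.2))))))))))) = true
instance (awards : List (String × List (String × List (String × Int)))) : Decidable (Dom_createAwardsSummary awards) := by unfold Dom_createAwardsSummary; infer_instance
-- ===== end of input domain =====

-- B assembles the result as a pure list of (key, entry) pairs with grand totals taken
-- from a flattened list of all sub-items, converting to a dict once at the end
-- (alternative data flow, same cost; return value only — neither mutates its argument).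


-- ===== PORT A =====
def createAwardsSummary (awards : List (String × List (String × List (String × Int)))) : List (String × List (String × Int)) :=
  let st := awards.foldl
    (fun (st : PySem.Dict String (List (String × Int)) × Int × Int) kv =>
      let nAwarded : Int :=
        kv.2.foldl (fun n lw =>
          if (PySem.Dict.mk lw.2).get? "achieve" == some (1 : Int) then n + 1 else n) 0
      let nAwards : Int := kv.2.length
      (st.1.insert kv.1 [("nAwarded", nAwarded), ("nAwards", nAwards)],
       st.2.1 + nAwarded, st.2.2 + nAwards))
    (PySem.Dict.empty, 0, 0)
  (st.1.insert "All awards" [("nAwarded", st.2.1), ("nAwards", st.2.2)]).items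

-- ===== PORT B =====
-- w["achieve"] == 1 for a sub-item w
def achieved (lw : String × List (String × Int)) : Bool :=
  (PySem.Dict.mk lw.2).get? "achieve" == some (1 : Int)

-- one per-category entry of B's `entries` comprehension
def awardEntry (v : List (String × List (String × Int))) : List (String × Int) :=
  [("nAwarded", ((v.filter achieved).length : Int)), ("nAwards", (v.length : Int))]

def createAwardsSummary_alt (awards : List (String × List (String × List (String × Int)))) : List (String × List (String × Int)) :=
  let entries := awards.map (fun kv => (kv.1, awardEntry kv.2))
  let flat := awards.flatMap (fun kv => kv.2)
  let total : List (String × Int) :=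
    [("nAwarded", ((flat.filter achieved).length : Int)), ("nAwards", (flat.length : Int))]
  (PySem.Dict.ofList (entries ++ [("All awards", total)])).items

-- ===== PRECONDITION & SPEC =====
-- Pre_ excludes exactly the inputs where some innermost award dict lacks the key
-- "achieve": there both A and B raise KeyError.
def Pre_createAwardsSummary (awards : List (String × List (String × List (String × Int)))) : Prop :=
  ∀ kv ∈ awards, ∀ lw ∈ kv.2, "achieve" ∈ lw.2.map Prod.fst
instance (awards : List (String × List (String × List (String × Int)))) : Decidable (Pre_createAwardsSummary awards) := by unfold Pre_createAwardsSummary; infer_instance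

def pvWitness_createAwardsSummary : (List (String × List (String × List (String × Int)))) :=
  [("medals", [("x", [("achieve", 1)]), ("y", [("achieve", 0)])]), ("honors", [])]

def Spec_createAwardsSummary (awards : List (String × List (String × List (String × Int)))) (out : List (String × List (String × Int))) : Prop := out = createAwardsSummary_alt awards
instance (awards : List (String × List (String × List (String × Int)))) (out : List (String × List (String × Int))) : Decidable (Spec_createAwardsSummary awards out) := by unfold Spec_createAwardsSummary; infer_instance

-- ===== CLAIM (what is proved, stated in full; the proofs are below) =====
def Claim_equal_createAwardsSummary : Prop := ∀ (awards : List (String × List (String × List (String × Int)))), Dom_createAwardsSummary awards → Pre_createAwardsSummary awards → Spec_createAwardsSummary awards (createAwardsSummary awards)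

-- ===== LEMMAS AND PROOFS =====

-- A's inner counting loop computes B's filtered length.
theorem count_eq (v : List (String × List (String × Int))) :
    v.foldl (fun n lw =>
        if (PySem.Dict.mk lw.2).get? "achieve" == some (1 : Int) then n + 1 else n) (0 : Int)
      = ((v.filter achieved).length : Int) := by
  rw [show (fun (n : Int) lw =>
        if (PySem.Dict.mk lw.2).get? "achieve" == some (1 : Int) then n + 1 else n)
      = (fun n lw => if achieved lw then n + 1 else n) from rfl,
    PySem.List.foldl_count_if]
  simp [List.countP_eq_length_filter]

-- A's fold state: the dict is the insert-fold over B's entries, and the running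
-- totals accumulate the per-category counts and lengths.
theorem stateA (awards : List (String × List (String × List (String × Int))))
    (d : PySem.Dict String (List (String × Int))) (a n : Int) :
    awards.foldl
      (fun (st : PySem.Dict String (List (String × Int)) × Int × Int) kv =>
        let nAwarded : Int :=
          kv.2.foldl (fun n lw =>
            if (PySem.Dict.mk lw.2).get? "achieve" == some (1 : Int) then n + 1 else n) 0
        let nAwards : Int := kv.2.length
        (st.1.insert kv.1 [("nAwarded", nAwarded), ("nAwards", nAwards)],
         st.2.1 + nAwarded, st.2.2 + nAwards)) (d, a, n)
    = (awards.foldl (fun d kv => d.insert kv.1 (awardEntry kv.2)) d,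
       a + (awards.map (fun kv => ((kv.2.filter achieved).length : Int))).sum,
       n + (awards.map (fun kv => (kv.2.length : Int))).sum) := by
  induction awards generalizing d a n with
  | nil => simp
  | cons kv rest ih =>
      rw [List.foldl_cons, ih]
      simp only [List.map_cons, List.sum_cons, awardEntry, count_eq, Prod.mk.injEq]
      exact ⟨rfl, by ring, by ring⟩

theorem createAwardsSummary_eq (awards : List (String × List (String × List (String × Int)))) :
    createAwardsSummary awards = createAwardsSummary_alt awards := by
  unfold createAwardsSummary createAwardsSummary_alt
  rw [stateA]
  simp only [PySem.Dict.ofList, PySem.Dict.update, List.foldl_append, List.foldl_cons,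
    List.foldl_nil, List.foldl_map, zero_add]
  congr 3
  · rw [List.filter_flatMap, List.length_flatMap]
    simp [List.map_map, Function.comp_def]
  · rw [List.length_flatMap]
    simp [List.map_map, Function.comp_def]

-- ===== VERDICT (by name: the statement is the Claim_ definition above) =====
theorem createAwardsSummary_spec : Claim_equal_createAwardsSummary := by
  intro awards _ _
  exact (createAwardsSummary_eq awards) ▸ rfl
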